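-- pv_equiv track=rewrite | github.com/BoJakobsen/AoC2023 | src_2025/puz_12.py | checkit
-- ===== SOURCE A (Python) =====
-- def checkit(rec,cgrp):
--     ingrp = False
--     cnt = 0
--     contgrp_test = []
--     for ch in rec:
--         if (ch == '#' or ch == '?') and not ingrp:
--             ingrp = True
--             cnt += 1
--         elif (ch == '#' or ch == '?') and ingrp:
--             cnt += 1
--         elif ch =='.' and ingrp:
--             ingrp = False
--             contgrp_test.append(cnt)
--             cnt = 0
--     if ingrp :  # handle end case
--             contgrp_test.append(cnt)
--     if cgrp == contgrp_test:
--         res = True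
--     else:
--         res = False
--     return res
-- ===== SOURCE B (Python) =====
-- def checkit(rec, cgrp):
--     counts = [c for c in (sum(ch in '#?' for ch in seg) for seg in rec.split('.'))
--               if c > 0]
--     return cgrp == counts
-- ===== Notes on version B (the rewrite author's own statement) =====
-- stated objective: simpler
-- what changed: Replaces A's stateful ingrp/cnt character scanner with a split-on-'.' pass that counts '#'/'?' per segment and keeps the positive counts.
import Mathlib
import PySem

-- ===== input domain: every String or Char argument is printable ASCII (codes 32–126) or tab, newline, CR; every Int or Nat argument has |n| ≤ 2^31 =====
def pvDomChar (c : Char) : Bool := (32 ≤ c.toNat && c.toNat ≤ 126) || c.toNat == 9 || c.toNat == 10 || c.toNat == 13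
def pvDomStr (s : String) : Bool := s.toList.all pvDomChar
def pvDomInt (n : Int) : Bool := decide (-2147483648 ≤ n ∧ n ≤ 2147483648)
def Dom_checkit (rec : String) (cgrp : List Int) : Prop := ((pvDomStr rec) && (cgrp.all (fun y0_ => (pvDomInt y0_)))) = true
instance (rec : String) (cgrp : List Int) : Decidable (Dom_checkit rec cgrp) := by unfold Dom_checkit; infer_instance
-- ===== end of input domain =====

-- B replaces A's stateful ingrp/cnt scanner by split-on-'.' then count '#'/'?' per segment (objective: simpler).

-- ===== PORT A =====
-- loop body of A's for-loop, as a named helper (state = (ingrp, cnt, contgrp_test))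
def pvStepA (st : Bool × Int × List Int) (ch : Char) : Bool × Int × List Int :=
  if (ch == '#' || ch == '?') && !st.1 then (true, st.2.1 + 1, st.2.2)
  else if (ch == '#' || ch == '?') && st.1 then (st.1, st.2.1 + 1, st.2.2)
  else if ch == '.' && st.1 then (false, 0, st.2.2 ++ [st.2.1])
  else st

def checkit (rec : String) (cgrp : List Int) : Bool :=
  let st := rec.toList.foldl pvStepA (false, 0, [])
  let contgrp_test := if st.1 then st.2.2 ++ [st.2.1] else st.2.2
  if cgrp == contgrp_test then true else false

-- ===== PORT B =====
def checkit_alt (rec : String) (cgrp : List Int) : Bool :=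
  let counts := ((rec.toList.splitOn '.').map
      (fun seg => ((seg.countP (fun ch => ch == '#' || ch == '?') : Nat) : Int))).filter
      (fun c => decide (0 < c))
  cgrp == counts

-- ===== PRECONDITION & SPEC =====
def Spec_checkit (rec : String) (cgrp : List Int) (out : Bool) : Prop := out = checkit_alt rec cgrp
instance (rec : String) (cgrp : List Int) (out : Bool) : Decidable (Spec_checkit rec cgrp out) := by unfold Spec_checkit; infer_instance

-- ===== CLAIM (what is proved, stated in full; the proofs are below) =====
def Claim_equal_checkit : Prop := ∀ (rec : String) (cgrp : List Int), Dom_checkit rec cgrp → Spec_checkit rec cgrp (checkit rec cgrp)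

-- ===== LEMMAS AND PROOFS =====

-- reference groups function (proof-only)
def pvGroups : List Char → Int → List Int
  | [], cnt => if 0 < cnt then [cnt] else []
  | ch :: cs, cnt =>
    if ch == '.' then (if 0 < cnt then cnt :: pvGroups cs 0 else pvGroups cs 0)
    else if ch == '#' || ch == '?' then pvGroups cs (cnt + 1)
    else pvGroups cs cnt

def pvCount (seg : List Char) : Int := (seg.countP (fun ch => ch == '#' || ch == '?') : Nat)

def pvBCounts (cnt : Int) (segs : List Int) : List Int :=
  match segs with
  | [] => []
  | h :: t => (if 0 < cnt + h then [cnt + h] else []) ++ t.filter (fun c => decide (0 < c))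

lemma pvBCounts_zero (segs : List Int) (h : segs ≠ []) :
    pvBCounts 0 segs = segs.filter (fun c => decide (0 < c)) := by
  cases segs with
  | nil => exact absurd rfl h
  | cons x t =>
    simp [pvBCounts, List.filter_cons]
    split_ifs with hx <;> simp_all

lemma pvFoldA (cs : List Char) (cnt : Int) (acc : List Int) (h : 0 ≤ cnt) :
    (let st := cs.foldl pvStepA (decide (0 < cnt), cnt, acc)
     if st.1 then st.2.2 ++ [st.2.1] else st.2.2) = acc ++ pvGroups cs cnt := by
  induction cs generalizing cnt acc with
  | nil =>
    simp only [List.foldl_nil, pvGroups]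
    split_ifs with h1 <;> simp_all
  | cons ch cs ih =>
    simp only [List.foldl_cons, pvGroups, pvStepA]
    by_cases hf : (ch == '#' || ch == '?') = true
    · have hd' : (ch == '.') = false := by
        rcases (by simpa using hf : ch = '#' ∨ ch = '?') with h1 | h1 <;> simp [h1]
      have := ih (cnt + 1) acc (by omega)
      rw [show (decide (0 < cnt + 1)) = true by simp; omega] at this
      by_cases hg : (0 < cnt)
      · simpa [hf, hd', hg] using this
      · simpa [hf, hd', hg] using this
    · by_cases hd : (ch == '.') = true
      · by_cases hg : (0 < cnt)
        · have := ih 0 (acc ++ [cnt]) (by omega)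
          simp only [show (decide ((0:Int) < 0)) = false by simp] at this
          simp only [hf, hd, hg] at *
          simpa [pvStepA, List.append_assoc] using this
        · have h0 : cnt = 0 := by omega
          have := ih 0 acc (by omega)
          simp only [show (decide ((0:Int) < 0)) = false by simp] at this
          simp [hf, hd, h0] at *
          simpa using this
      · have := ih cnt acc h
        simpa [hf, hd] using this

lemma pvGroups_eq_bcounts (cs : List Char) (cnt : Int) :
    pvGroups cs cnt = pvBCounts cnt ((cs.splitOnP (· == '.')).map pvCount) := by
  induction cs generalizing cnt with
  | nil =>
    simp [pvGroups, List.splitOnP_nil, pvBCounts, pvCount]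
  | cons ch cs ih =>
    rw [List.splitOnP_cons]
    by_cases hd : (ch == '.') = true
    · simp only [hd, if_true, List.map_cons, pvGroups]
      have hne : cs.splitOnP (· == '.') ≠ [] := List.splitOnP_ne_nil _ _
      have hne' : (cs.splitOnP (· == '.')).map pvCount ≠ [] := by
        simpa using hne
      rw [ih 0, pvBCounts_zero _ hne']
      have hc0 : pvCount [] = 0 := by simp [pvCount]
      cases hm : (cs.splitOnP (· == '.')).map pvCount with
      | nil => exact absurd hm hne'
      | cons x t =>
        simp only [pvBCounts, hc0, List.filter_cons]
        split_ifs with hg hx hx <;> simp_all <;> omega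
    · obtain ⟨x, t, hm⟩ := List.exists_cons_of_ne_nil (List.splitOnP_ne_nil (α := Char) (· == '.') cs)
      by_cases hf : (ch == '#' || ch == '?') = true
      · simp only [hd, if_false, List.modifyHead, hm, List.map_cons, pvGroups, hf, if_true,
          Bool.false_eq_true]
        rw [ih (cnt + 1)]
        have : pvCount (ch :: x) = pvCount x + 1 := by
          simp [pvCount, hf]
        simp [hm, this, pvBCounts, add_comm (pvCount x) 1, ← add_assoc]
      · simp only [hd, if_false, List.modifyHead, hm, List.map_cons, pvGroups, hf,
          Bool.false_eq_true]
        rw [ih cnt]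
        have : pvCount (ch :: x) = pvCount x := by
          simp [pvCount, hf]
        simp [hm, this, pvBCounts]

-- ===== VERDICT (by name: the statement is the Claim_ definition above) =====
theorem checkit_spec : Claim_equal_checkit := by
  intro rec cgrp _
  unfold Spec_checkit checkit checkit_alt
  have hA := pvFoldA rec.toList 0 [] le_rfl
  simp only [show (decide ((0:Int) < 0)) = false by simp, List.nil_append] at hA
  have hB := pvGroups_eq_bcounts rec.toList 0
  have hne : rec.toList.splitOnP (· == '.') ≠ [] := List.splitOnP_ne_nil _ _
  have hne' : (rec.toList.splitOnP (· == '.')).map pvCount ≠ [] := by simpa using hne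
  rw [pvBCounts_zero _ hne'] at hB
  simp only []
  rw [hA, hB]
  simp only [List.splitOn]
  have hpc : pvCount = (fun seg : List Char =>
      ((seg.countP (fun ch => ch == '#' || ch == '?') : Nat) : Int)) := rfl
  rw [hpc]
  split_ifs with h <;> simp_all
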